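-- pv_equiv track=rewrite | github.com/Lushios/advent-of-code-2024 | 2/part2.py | is_line_safe
-- ===== SOURCE A (Python) =====
-- def is_line_safe(line, allow_recursion=True):
--     diff = 0
--     for i in range(len(line) - 1):
--         new_diff = int(line[i + 1]) - int(line[i])
--         if abs(new_diff) not in range(1, 4):
--             if allow_recursion:
--                 candidates_for_removal = [x for x in [i-1, i, i+1, i+2] if 0 <= x < len(line)]
--                 result = False
--                 for candidate in candidates_for_removal:
--                     result |= is_line_safe(line[:candidate] + line[candidate+1:], False)
--                 return result
--             else:
--                 return False
--         elif new_diff * diff < 0: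
--             if allow_recursion:
--                 candidates_for_removal = [x for x in [i-1, i, i+1, i+2] if 0 <= x < len(line)]
--                 result = False
--                 for candidate in candidates_for_removal:
--                     result |= is_line_safe(line[:candidate] + line[candidate+1:], False)
--                 return result
--             else:
--                 return False
--         diff = new_diff
--     return True
-- ===== SOURCE B (Python) =====
-- def is_safe_simple(levels):
--     diffs = [int(b) - int(a) for a, b in zip(levels, levels[1:])]
--     return all(1 <= d <= 3 for d in diffs) or all(-3 <= d <= -1 for d in diffs)
--
--
-- def is_line_safe(line, allow_recursion=True):
--     if is_safe_simple(line):
--         return True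
--     if not allow_recursion:
--         return False
--     return any(is_safe_simple(line[:j] + line[j + 1:]) for j in range(len(line)))
-- ===== Notes on version B (the rewrite author's own statement) =====
-- stated objective: simpler
-- what changed: Replaces A's stateful first-violation scan with a local 4-candidate removal window by a stateless all-increasing/all-decreasing diff-list check plus an exhaustive single-removal search over every index.
-- outside the precondition, e.g. on is_line_safe(['1', '9', '1', '9', 'x'], True): A returns False, B raises ValueError
import Mathlib
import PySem

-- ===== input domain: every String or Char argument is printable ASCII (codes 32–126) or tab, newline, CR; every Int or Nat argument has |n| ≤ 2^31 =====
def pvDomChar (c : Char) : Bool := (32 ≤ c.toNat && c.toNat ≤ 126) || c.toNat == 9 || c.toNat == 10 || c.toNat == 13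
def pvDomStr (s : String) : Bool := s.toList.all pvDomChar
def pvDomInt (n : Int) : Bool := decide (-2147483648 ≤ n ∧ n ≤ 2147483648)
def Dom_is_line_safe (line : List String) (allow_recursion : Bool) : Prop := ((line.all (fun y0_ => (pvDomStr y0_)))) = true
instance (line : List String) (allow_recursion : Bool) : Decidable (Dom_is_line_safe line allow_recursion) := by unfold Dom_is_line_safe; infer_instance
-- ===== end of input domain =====

-- B replaces A's stateful first-violation scan + 4-candidate removal window by a stateless
-- monotone-diff check plus an exhaustive single-removal search (objective: simpler).

-- ===== PORT A =====
-- int(s): under Pre_ every conversion succeeds; the default is never observed inside Pre_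
def pvParse (s : String) : Int := (PySem.Int.ofStr? s).getD 0

-- int(line[i+1]) - int(line[i]); the index is always in range when A evaluates it
def pvNewDiff (line : List String) (i : Int) : Int :=
  pvParse (PySem.List.pyGetD line (i + 1) "") - pvParse (PySem.List.pyGetD line i "")

-- [x for x in [i-1, i, i+1, i+2] if 0 <= x < len(line)]
def pvCands (i : Int) (n : Nat) : List Int :=
  [i - 1, i, i + 1, i + 2].filter (fun x => decide (0 ≤ x) && decide (x < (n : Int)))

-- line[:c] + line[c+1:]
def pvRemove (line : List String) (c : Int) : List String :=
  PySem.List.slice line none (some c) ++ PySem.List.slice line (some (c + 1)) none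

-- the loop of is_line_safe with allow_recursion=False (returns False at the first violation)
def pvLoopF (line : List String) : List Int → Int → Bool
  | [], _ => true
  | i :: rest, diff =>
    let nd := pvNewDiff line i
    if !(decide (1 ≤ nd.natAbs) && decide (nd.natAbs < 4)) then false
    else if nd * diff < 0 then false
    else pvLoopF line rest nd

-- is_line_safe(sub, False)
def pvNoRec (line : List String) : Bool :=
  pvLoopF line (PySem.List.pyRange 0 ((line.length : Int) - 1) 1) 0

-- result |= is_line_safe(line[:c]+line[c+1:], False) over the candidate window
def pvTryRemovals (line : List String) (i : Int) : Bool :=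
  (pvCands i line.length).foldl (fun r c => r || pvNoRec (pvRemove line c)) false

-- the loop of is_line_safe with allow_recursion=True
def pvLoopT (line : List String) : List Int → Int → Bool
  | [], _ => true
  | i :: rest, diff =>
    let nd := pvNewDiff line i
    if !(decide (1 ≤ nd.natAbs) && decide (nd.natAbs < 4)) then pvTryRemovals line i
    else if nd * diff < 0 then pvTryRemovals line i
    else pvLoopT line rest nd

def is_line_safe (line : List String) (allow_recursion : Bool) : Bool :=
  if allow_recursion then pvLoopT line (PySem.List.pyRange 0 ((line.length : Int) - 1) 1) 0
  else pvNoRec line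

-- ===== PORT B =====
-- [int(b) - int(a) for a, b in zip(levels, levels[1:])]
def pvDiffs (levels : List String) : List Int :=
  (levels.zip (levels.drop 1)).map (fun ab => pvParse ab.2 - pvParse ab.1)

-- 1 <= d <= 3    /    -3 <= d <= -1
def pvPosB (d : Int) : Bool := decide (1 ≤ d) && decide (d ≤ 3)
def pvNegB (d : Int) : Bool := decide (-3 ≤ d) && decide (d ≤ -1)

def is_safe_simple (levels : List String) : Bool :=
  (pvDiffs levels).all pvPosB || (pvDiffs levels).all pvNegB

def is_line_safe_alt (line : List String) (allow_recursion : Bool) : Bool :=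
  if is_safe_simple line then true
  else if !allow_recursion then false
  else (List.range line.length).any fun j => is_safe_simple (line.take j ++ line.drop (j + 1))

-- ===== PRECONDITION & SPEC =====
-- Pre_ excludes lines of length >= 2 containing a token int() rejects: there A almost always raises
-- ValueError, and in the rare case it still returns, the value depends on A's lazy left-to-right
-- conversion order (B converts eagerly and raises there).
def Pre_is_line_safe (line : List String) (allow_recursion : Bool) : Prop :=
  line.length ≤ 1 ∨ ∀ s ∈ line, (PySem.Int.ofStr? s).isSome = true
instance (line : List String) (allow_recursion : Bool) : Decidable (Pre_is_line_safe line allow_recursion) := by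
  unfold Pre_is_line_safe; infer_instance
def pvWitness_is_line_safe : List String × Bool := (["1", "2", "4"], true)

def Spec_is_line_safe (line : List String) (allow_recursion : Bool) (out : Bool) : Prop := out = is_line_safe_alt line allow_recursion
instance (line : List String) (allow_recursion : Bool) (out : Bool) : Decidable (Spec_is_line_safe line allow_recursion out) := by unfold Spec_is_line_safe; infer_instance

-- ===== CLAIM (what is proved, stated in full; the proofs are below) =====
def Claim_equal_is_line_safe : Prop := ∀ (line : List String) (allow_recursion : Bool), Dom_is_line_safe line allow_recursion → Pre_is_line_safe line allow_recursion → Spec_is_line_safe line allow_recursion (is_line_safe line allow_recursion)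

-- ===== LEMMAS AND PROOFS =====

-- abs(d) in range(1, 4)
def pvGoodB (d : Int) : Bool := decide (1 ≤ d.natAbs) && decide (d.natAbs < 4)

-- proof-side reformulation of A's scan: state = previous diff
def pvChainOK : Int → List Int → Bool
  | _, [] => true
  | p, d :: rest => pvGoodB d && !(d * p < 0) && pvChainOK d rest

-- remove index j (Nat form of line[:j] + line[j+1:])
def pvRemoveN (line : List String) (j : Nat) : List String := line.take j ++ line.drop (j + 1)

lemma pvGoodB_eq (d : Int) : pvGoodB d = (pvPosB d || pvNegB d) := by
  simp only [pvGoodB, pvPosB, pvNegB]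
  rw [Bool.eq_iff_iff]
  simp only [Bool.and_eq_true, Bool.or_eq_true, decide_eq_true_eq]
  omega

lemma chainOK_of_pos (ds : List Int) : ∀ p : Int, 0 < p → pvChainOK p ds = ds.all pvPosB := by
  induction ds with
  | nil => intro p hp; rfl
  | cons d rest ih =>
    intro p hp
    simp only [pvChainOK, List.all_cons]
    by_cases hpos : pvPosB d = true
    · have hd : 0 < d := by
        simp only [pvPosB, Bool.and_eq_true, decide_eq_true_eq] at hpos; omega
      have hg : pvGoodB d = true := by
        simp only [pvGoodB, Bool.and_eq_true, decide_eq_true_eq]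
        simp only [pvPosB, Bool.and_eq_true, decide_eq_true_eq] at hpos; omega
      have hnlt : ¬ d * p < 0 := by
        have := mul_pos hd hp; omega
      simp [hg, hnlt, hpos, ih d hd]
    · simp only [Bool.not_eq_true] at hpos
      simp only [hpos, Bool.false_and]
      by_cases hg : pvGoodB d = true
      · have hd : d < 0 := by
          simp only [pvGoodB, Bool.and_eq_true, decide_eq_true_eq] at hg
          simp only [pvPosB, Bool.and_eq_false_iff, decide_eq_false_iff_not] at hpos
          omega
        have : d * p < 0 := mul_neg_of_neg_of_pos hd hp
        simp [hg, this]
      · simp only [Bool.not_eq_true] at hg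
        simp [hg]

lemma chainOK_of_neg (ds : List Int) : ∀ p : Int, p < 0 → pvChainOK p ds = ds.all pvNegB := by
  induction ds with
  | nil => intro p hp; rfl
  | cons d rest ih =>
    intro p hp
    simp only [pvChainOK, List.all_cons]
    by_cases hneg : pvNegB d = true
    · have hd : d < 0 := by
        simp only [pvNegB, Bool.and_eq_true, decide_eq_true_eq] at hneg; omega
      have hg : pvGoodB d = true := by
        simp only [pvGoodB, Bool.and_eq_true, decide_eq_true_eq]
        simp only [pvNegB, Bool.and_eq_true, decide_eq_true_eq] at hneg; omega
      have hnlt : ¬ d * p < 0 := by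
        have := mul_pos_of_neg_of_neg hd hp; omega
      simp [hg, hnlt, hneg, ih d hd]
    · simp only [Bool.not_eq_true] at hneg
      simp only [hneg, Bool.false_and]
      by_cases hg : pvGoodB d = true
      · have hd : 0 < d := by
          simp only [pvGoodB, Bool.and_eq_true, decide_eq_true_eq] at hg
          simp only [pvNegB, Bool.and_eq_false_iff, decide_eq_false_iff_not] at hneg
          omega
        have : d * p < 0 := mul_neg_of_pos_of_neg hd hp
        simp [hg, this]
      · simp only [Bool.not_eq_true] at hg
        simp [hg]

lemma chainOK_zero (ds : List Int) : pvChainOK 0 ds = (ds.all pvPosB || ds.all pvNegB) := by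
  cases ds with
  | nil => rfl
  | cons d rest =>
    simp only [pvChainOK, List.all_cons, mul_zero]
    by_cases hg : pvGoodB d = true
    · have hd : d < 0 ∨ 0 < d := by
        simp only [pvGoodB, Bool.and_eq_true, decide_eq_true_eq] at hg; omega
      rcases hd with hd | hd
      · have hpos : pvPosB d = false := by
          simp only [pvPosB]; simp only [Bool.and_eq_false_iff, decide_eq_false_iff_not]; omega
        have hneg : pvNegB d = true := by
          simp only [pvGoodB, Bool.and_eq_true, decide_eq_true_eq] at hg
          simp only [pvNegB, Bool.and_eq_true, decide_eq_true_eq]; omega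
        simp [hg, hpos, hneg, chainOK_of_neg rest d hd]
      · have hpos : pvPosB d = true := by
          simp only [pvGoodB, Bool.and_eq_true, decide_eq_true_eq] at hg
          simp only [pvPosB, Bool.and_eq_true, decide_eq_true_eq]; omega
        have hneg : pvNegB d = false := by
          simp only [pvNegB]; simp only [Bool.and_eq_false_iff, decide_eq_false_iff_not]; omega
        simp [hg, hpos, hneg, chainOK_of_pos rest d hd]
    · simp only [Bool.not_eq_true] at hg
      have hpos : pvPosB d = false := by
        have := pvGoodB_eq d; rw [hg] at this
        exact (Bool.or_eq_false_iff.mp this.symm).1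
      have hneg : pvNegB d = false := by
        have := pvGoodB_eq d; rw [hg] at this
        exact (Bool.or_eq_false_iff.mp this.symm).2
      simp [hg, hpos, hneg]

lemma pvDiffs_length (xs : List String) : (pvDiffs xs).length = xs.length - 1 := by
  simp [pvDiffs]

lemma pvDiffs_getD (xs : List String) (t : Nat) (h : t + 1 < xs.length) :
    (pvDiffs xs).getD t 0 = pvParse (xs.getD (t + 1) "") - pvParse (xs.getD t "") := by
  have hlt : t < (pvDiffs xs).length := by rw [pvDiffs_length]; omega
  rw [List.getD_eq_getElem _ _ hlt,
      List.getD_eq_getElem xs "" (show t + 1 < xs.length from h),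
      List.getD_eq_getElem xs "" (show t < xs.length by omega)]
  simp only [pvDiffs, List.getElem_map, List.getElem_zip, List.getElem_drop]
  simp [Nat.add_comm]

lemma mem_pvDiffs_of_getD (xs : List String) (t : Nat) (h : t < (pvDiffs xs).length) :
    (pvDiffs xs).getD t 0 ∈ pvDiffs xs := by
  rw [List.getD_eq_getElem _ _ h]; exact List.getElem_mem h

lemma loopF_eq (line : List String) :
    ∀ (k i : Nat) (p : Int), i + k = line.length - 1 →
    pvLoopF line (PySem.List.pyRange (i : Int) ((line.length : Int) - 1) 1) p
      = pvChainOK p ((pvDiffs line).drop i) := by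
  intro k
  induction k with
  | zero =>
    intro i p hik
    rw [PySem.List.pyRange_one_eq_nil (by omega)]
    rw [List.drop_eq_nil_of_le (by rw [pvDiffs_length]; omega)]
    rfl
  | succ k ih =>
    intro i p hik
    have hilt : i + 1 < line.length := by omega
    rw [PySem.List.pyRange_one_cons (by omega)]
    have hdlt : i < (pvDiffs line).length := by rw [pvDiffs_length]; omega
    rw [List.drop_eq_getElem_cons hdlt]
    have hnd : pvNewDiff line (i : Int) = (pvDiffs line)[i] := by
      rw [← List.getD_eq_getElem _ 0 hdlt, pvDiffs_getD line i hilt]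
      simp only [pvNewDiff]
      have h1 : ((i : Int) + 1) = ((i + 1 : Nat) : Int) := by push_cast; ring
      rw [h1, PySem.List.pyGetD_natCast, PySem.List.pyGetD_natCast]
    simp only [pvLoopF, pvChainOK, hnd]
    have hrange : ((i : Int) + 1) = ((i + 1 : Nat) : Int) := by push_cast; ring
    rw [hrange, ih (i + 1) ((pvDiffs line)[i]) (by omega)]
    by_cases hg : pvGoodB ((pvDiffs line)[i]) = true
    · simp only [pvGoodB, Bool.and_eq_true, decide_eq_true_eq] at hg
      by_cases hs : (pvDiffs line)[i] * p < 0
      · simp [pvGoodB, hg.1, hg.2, hs]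
      · simp [pvGoodB, hg.1, hg.2, hs]
    · simp only [pvGoodB, Bool.and_eq_true, decide_eq_true_eq, not_and_or] at hg
      rcases hg with hg | hg <;>
        simp [pvGoodB, hg]

lemma noRec_eq_safe (line : List String) : pvNoRec line = is_safe_simple line := by
  have h0 : ((0 : Nat) : Int) = (0 : Int) := by norm_num
  have := loopF_eq line (line.length - 1) 0 0 (by omega)
  rw [h0] at this
  rw [pvNoRec, this, List.drop_zero, chainOK_zero, is_safe_simple]

lemma loopT_of_loopF_true (line : List String) :
    ∀ (idxs : List Int) (p : Int), pvLoopF line idxs p = true → pvLoopT line idxs p = true := by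
  intro idxs
  induction idxs with
  | nil => intro p _; rfl
  | cons i rest ih =>
    intro p h
    simp only [pvLoopF] at h
    simp only [pvLoopT]
    by_cases h1 : (!(decide (1 ≤ (pvNewDiff line i).natAbs) && decide ((pvNewDiff line i).natAbs < 4))) = true
    · rw [if_pos h1] at h; exact absurd h (by simp)
    · rw [if_neg h1] at h ⊢
      by_cases h2 : pvNewDiff line i * p < 0
      · rw [if_pos h2] at h; exact absurd h (by simp)
      · rw [if_neg h2] at h ⊢; exact ih _ h

lemma foldl_or_any (f : Int → Bool) (l : List Int) (b : Bool) :
    l.foldl (fun r c => r || f c) b = (b || l.any f) := by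
  induction l generalizing b with
  | nil => simp
  | cons c l ih => simp [List.foldl_cons, ih, Bool.or_assoc]

lemma removeN_getD (line : List String) (j m : Nat) (hj : j < line.length) :
    (pvRemoveN line j).getD m "" = if m < j then line.getD m "" else line.getD (m + 1) "" := by
  simp only [pvRemoveN, List.getD_eq_getElem?_getD]
  rcases lt_or_ge m j with hm | hm
  · rw [if_pos hm]
    rw [List.getElem?_append_left (by simp; omega)]
    rw [List.getElem?_take]
    simp [hm]
  · rw [if_neg (by omega)]
    rw [List.getElem?_append_right (by simp; omega)]
    rw [List.getElem?_drop]
    congr 2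
    simp
    omega

lemma removeN_length (line : List String) (j : Nat) (hj : j < line.length) :
    (pvRemoveN line j).length = line.length - 1 := by
  simp [pvRemoveN]; omega

lemma safe_simple_false_of_bad (xs : List String) (d : Int) (hd : d ∈ pvDiffs xs)
    (h : pvGoodB d = false) : is_safe_simple xs = false := by
  have := pvGoodB_eq d; rw [h] at this
  have hp := (Bool.or_eq_false_iff.mp this.symm).1
  have hn := (Bool.or_eq_false_iff.mp this.symm).2
  simp only [is_safe_simple, Bool.or_eq_false_iff]
  constructor
  · rw [List.all_eq_false]; exact ⟨d, hd, by simp [hp]⟩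
  · rw [List.all_eq_false]; exact ⟨d, hd, by simp [hn]⟩

lemma safe_simple_false_of_two (xs : List String) (d1 d2 : Int)
    (h1 : d1 ∈ pvDiffs xs) (h2 : d2 ∈ pvDiffs xs) (hprod : d1 * d2 < 0) :
    is_safe_simple xs = false := by
  simp only [is_safe_simple, Bool.or_eq_false_iff]
  rcases lt_trichotomy d1 0 with hlt | heq | hgt
  · have hd2 : 0 < d2 := by nlinarith
    constructor
    · rw [List.all_eq_false]
      exact ⟨d1, h1, by simp [pvPosB]; omega⟩
    · rw [List.all_eq_false]
      exact ⟨d2, h2, by simp [pvNegB]; omega⟩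
  · simp [heq] at hprod
  · have hd2 : d2 < 0 := by nlinarith
    constructor
    · rw [List.all_eq_false]
      exact ⟨d2, h2, by simp [pvPosB]; omega⟩
    · rw [List.all_eq_false]
      exact ⟨d1, h1, by simp [pvNegB]; omega⟩

-- the diff at position t of the removed list, both flanks on the same side of j
lemma diffs_removeN_getD_lt (line : List String) (j t : Nat) (hj : j < line.length)
    (ht : t + 1 < j) (htb : t + 1 < line.length) :
    (pvDiffs (pvRemoveN line j)).getD t 0 = (pvDiffs line).getD t 0 := by
  have hlen := removeN_length line j hj
  rw [pvDiffs_getD _ t (by omega), pvDiffs_getD _ t htb,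
      removeN_getD line j t hj, removeN_getD line j (t + 1) hj,
      if_pos (by omega), if_pos (by omega)]

lemma diffs_removeN_getD_ge (line : List String) (j t : Nat) (hj : j < line.length)
    (ht : j ≤ t) (htb : t + 2 < line.length) :
    (pvDiffs (pvRemoveN line j)).getD t 0 = (pvDiffs line).getD (t + 1) 0 := by
  have hlen := removeN_length line j hj
  rw [pvDiffs_getD _ t (by omega), pvDiffs_getD _ (t + 1) (by omega),
      removeN_getD line j t hj, removeN_getD line j (t + 1) hj,
      if_neg (by omega), if_neg (by omega)]

lemma window_far (line : List String) (i j : Nat) (hi : i + 1 < line.length)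
    (hj : j < line.length) (hfar : j + 2 ≤ i ∨ i + 3 ≤ j)
    (hviol : pvGoodB ((pvDiffs line).getD i 0) = false ∨
      (1 ≤ i ∧ pvGoodB ((pvDiffs line).getD (i - 1) 0) = true ∧
        ((pvDiffs line).getD i 0) * ((pvDiffs line).getD (i - 1) 0) < 0)) :
    is_safe_simple (pvRemoveN line j) = false := by
  have hlen := removeN_length line j hj
  -- d_i is present in the diffs of the removed list
  have hdi : ((pvDiffs line).getD i 0) ∈ pvDiffs (pvRemoveN line j) := by
    rcases hfar with hfar | hfar
    · have := diffs_removeN_getD_ge line j (i - 1) hj (by omega) (by omega)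
      have heq : i - 1 + 1 = i := by omega
      rw [heq] at this
      rw [← this]
      exact mem_pvDiffs_of_getD _ _ (by rw [pvDiffs_length]; omega)
    · have := diffs_removeN_getD_lt line j i hj (by omega) (by omega)
      rw [← this]
      exact mem_pvDiffs_of_getD _ _ (by rw [pvDiffs_length]; omega)
  rcases hviol with hbad | ⟨hi1, _hg, hprod⟩
  · exact safe_simple_false_of_bad _ _ hdi hbad
  · have hdi1 : ((pvDiffs line).getD (i - 1) 0) ∈ pvDiffs (pvRemoveN line j) := by
      rcases hfar with hfar | hfar
      · have := diffs_removeN_getD_ge line j (i - 2) hj (by omega) (by omega)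
        have heq : i - 2 + 1 = i - 1 := by omega
        rw [heq] at this
        rw [← this]
        exact mem_pvDiffs_of_getD _ _ (by rw [pvDiffs_length]; omega)
      · have := diffs_removeN_getD_lt line j (i - 1) hj (by omega) (by omega)
        rw [← this]
        exact mem_pvDiffs_of_getD _ _ (by rw [pvDiffs_length]; omega)
    exact safe_simple_false_of_two _ _ _ hdi hdi1 hprod

lemma pvRemove_eq_removeN (line : List String) (c : Int) (hc : 0 ≤ c) :
    pvRemove line c = pvRemoveN line c.toNat := by
  rw [pvRemove, pvRemoveN, PySem.List.slice_to line hc, PySem.List.slice_from line (by omega)]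
  congr 2
  omega

lemma tryRemovals_eq_any (line : List String) (i : Nat)
    (hfar : ∀ j : Nat, j < line.length → (j + 2 ≤ i ∨ i + 3 ≤ j) →
      is_safe_simple (pvRemoveN line j) = false) :
    pvTryRemovals line (i : Int)
      = (List.range line.length).any (fun j => is_safe_simple (line.take j ++ line.drop (j + 1))) := by
  rw [pvTryRemovals, foldl_or_any, Bool.false_or]
  rw [Bool.eq_iff_iff, List.any_eq_true, List.any_eq_true]
  constructor
  · rintro ⟨c, hc, hval⟩
    simp only [pvCands, List.mem_filter, Bool.and_eq_true, decide_eq_true_eq] at hc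
    refine ⟨c.toNat, List.mem_range.mpr (by omega), ?_⟩
    rw [pvRemove_eq_removeN line c hc.2.1, noRec_eq_safe] at hval
    exact hval
  · rintro ⟨j, hjm, hval⟩
    rw [List.mem_range] at hjm
    have hnear : ¬ (j + 2 ≤ i ∨ i + 3 ≤ j) := by
      intro h
      have := hfar j hjm h
      rw [show (line.take j ++ line.drop (j + 1)) = pvRemoveN line j from rfl] at hval
      rw [this] at hval; exact absurd hval (by simp)
    refine ⟨(j : Int), ?_, ?_⟩
    · simp only [pvCands, List.mem_filter, Bool.and_eq_true, decide_eq_true_eq]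
      constructor
      · simp only [List.mem_cons]
        omega
      · omega
    · rw [pvRemove_eq_removeN line (j : Int) (by omega), noRec_eq_safe]
      simpa using hval

lemma loopT_false (line : List String) :
    ∀ (k i : Nat) (p : Int), i + k = line.length - 1 →
    (p = if i = 0 then 0 else (pvDiffs line).getD (i - 1) 0) →
    (∀ t : Nat, t < i → pvGoodB ((pvDiffs line).getD t 0) = true) →
    pvLoopF line (PySem.List.pyRange (i : Int) ((line.length : Int) - 1) 1) p = false →
    pvLoopT line (PySem.List.pyRange (i : Int) ((line.length : Int) - 1) 1) p
      = (List.range line.length).any (fun j => is_safe_simple (line.take j ++ line.drop (j + 1))) := by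
  intro k
  induction k with
  | zero =>
    intro i p hik _ _ hF
    rw [PySem.List.pyRange_one_eq_nil (by omega)] at hF
    exact absurd hF (by simp [pvLoopF])
  | succ k ih =>
    intro i p hik hp hinv hF
    have hilt : i + 1 < line.length := by omega
    rw [PySem.List.pyRange_one_cons (by omega)] at hF ⊢
    have hdlt : i < (pvDiffs line).length := by rw [pvDiffs_length]; omega
    have hnd : pvNewDiff line (i : Int) = (pvDiffs line).getD i 0 := by
      rw [pvDiffs_getD line i hilt]
      simp only [pvNewDiff]
      have h1 : ((i : Int) + 1) = ((i + 1 : Nat) : Int) := by push_cast; ring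
      rw [h1, PySem.List.pyGetD_natCast, PySem.List.pyGetD_natCast]
    simp only [pvLoopF, hnd] at hF
    simp only [pvLoopT, hnd]
    by_cases hg : pvGoodB ((pvDiffs line).getD i 0) = true
    · have hgood : (!(decide (1 ≤ ((pvDiffs line).getD i 0).natAbs) && decide (((pvDiffs line).getD i 0).natAbs < 4))) = false := by
        simp only [pvGoodB] at hg; simp only [hg, Bool.not_true]
      rw [if_neg (ne_true_of_eq_false hgood)] at hF ⊢
      by_cases hs : (pvDiffs line).getD i 0 * p < 0
      · rw [if_pos hs]
        have hi1 : 1 ≤ i := by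
          by_contra hcon
          have : i = 0 := by omega
          rw [this] at hp; simp at hp
          rw [hp] at hs; simp at hs
        rw [hp, if_neg (by omega)] at hs
        apply tryRemovals_eq_any line i
        intro j hjn hjf
        exact window_far line i j hilt hjn hjf
          (Or.inr ⟨hi1, hinv (i - 1) (by omega), hs⟩)
      · rw [if_neg hs] at hF ⊢
        have hcast : ((i : Int) + 1) = ((i + 1 : Nat) : Int) := by push_cast; ring
        rw [hcast] at hF ⊢
        apply ih (i + 1) _ (by omega) (by simp) _ hF
        intro t ht
        rcases Nat.lt_succ_iff_lt_or_eq.mp ht with ht | ht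
        · exact hinv t ht
        · rw [ht]; exact hg
    · have hbad : (!(decide (1 ≤ ((pvDiffs line).getD i 0).natAbs) && decide (((pvDiffs line).getD i 0).natAbs < 4))) = true := by
        rw [Bool.not_eq_true] at hg; simp only [pvGoodB] at hg
        simp only [hg, Bool.not_false]
      rw [if_pos hbad]
      apply tryRemovals_eq_any line i
      intro j hjn hjf
      exact window_far line i j hilt hjn hjf (Or.inl (by simpa using hg))

-- ===== VERDICT (by name: the statement is the Claim_ definition above) =====
theorem is_line_safe_spec : Claim_equal_is_line_safe := by
  intro line allow _hdom _hpre
  unfold Spec_is_line_safe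
  cases allow with
  | false =>
    rw [is_line_safe, if_neg (by simp), noRec_eq_safe, is_line_safe_alt]
    by_cases hs : is_safe_simple line = true
    · rw [hs, if_pos rfl]
    · rw [Bool.not_eq_true] at hs
      rw [hs, if_neg (by simp), if_pos (by simp)]
  | true =>
    rw [is_line_safe, if_pos rfl, is_line_safe_alt]
    by_cases hs : is_safe_simple line = true
    · rw [if_pos hs]
      have hF : pvLoopF line (PySem.List.pyRange 0 ((line.length : Int) - 1) 1) 0 = true := by
        have := noRec_eq_safe line
        rw [pvNoRec] at this
        rw [this]; exact hs
      exact loopT_of_loopF_true line _ 0 hF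
    · rw [Bool.not_eq_true] at hs
      rw [if_neg (by simp [hs]), if_neg (by simp)]
      have hF : pvLoopF line (PySem.List.pyRange 0 ((line.length : Int) - 1) 1) 0 = false := by
        have := noRec_eq_safe line
        rw [pvNoRec] at this
        rw [this]; exact hs
      have h0 : ((0 : Nat) : Int) = (0 : Int) := by norm_num
      have := loopT_false line (line.length - 1) 0 0 (by omega) (by simp) (by omega) (by rw [h0]; exact hF)
      rw [h0] at this
      exact this
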